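-- pv_equiv track=rewrite | github.com/Kingofthedivanich/pyDiskmath_12.50 | main.py | find_max_comparisons
-- ===== SOURCE A (Python) =====
-- def quicksort_comparisons(arr):
--     if len(arr) <= 1:
--         return arr, 0
--
--     pivot = arr[len(arr) // 2]
--     left = [x for x in arr if x < pivot]
--     middle = [x for x in arr if x == pivot]
--     right = [x for x in arr if x > pivot]
--
--     sorted_left, comparisons_left = quicksort_comparisons(left)
--     sorted_right, comparisons_right = quicksort_comparisons(right)
--
--     return sorted_left + middle + sorted_right, comparisons_left + comparisons_right + len(arr) - 1
--
-- def find_max_comparisons(arrays):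
--     max_comparisons = -1
--     max_array = None
--
--     for arr in arrays:
--         sorted_arr, comparisons = quicksort_comparisons(arr.copy())
--         if comparisons > max_comparisons:
--             max_comparisons = comparisons
--             max_array = arr
--
--     return max_array, max_comparisons
-- ===== SOURCE B (Python) =====
-- def find_max_comparisons(arrays):
--     max_comparisons = -1
--     max_array = None
--
--     for arr in arrays:
--         total = 0
--         stack = [arr]
--         while stack:
--             seg = stack.pop()
--             n = len(seg)
--             if n <= 1:
--                 continue
--             pivot = seg[n // 2]
--             total += n - 1
--             stack.append([x for x in seg if x < pivot])
--             stack.append([x for x in seg if x > pivot])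
--         if total > max_comparisons:
--             max_comparisons = total
--             max_array = arr
--
--     return max_array, max_comparisons
-- ===== Notes on version B (the rewrite author's own statement) =====
-- stated objective: alternative
-- what changed: Replaces A's recursive quicksort helper (which also builds the sorted array the caller discards) with an explicit-stack iterative loop that only accumulates the comparison count.
import Mathlib
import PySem

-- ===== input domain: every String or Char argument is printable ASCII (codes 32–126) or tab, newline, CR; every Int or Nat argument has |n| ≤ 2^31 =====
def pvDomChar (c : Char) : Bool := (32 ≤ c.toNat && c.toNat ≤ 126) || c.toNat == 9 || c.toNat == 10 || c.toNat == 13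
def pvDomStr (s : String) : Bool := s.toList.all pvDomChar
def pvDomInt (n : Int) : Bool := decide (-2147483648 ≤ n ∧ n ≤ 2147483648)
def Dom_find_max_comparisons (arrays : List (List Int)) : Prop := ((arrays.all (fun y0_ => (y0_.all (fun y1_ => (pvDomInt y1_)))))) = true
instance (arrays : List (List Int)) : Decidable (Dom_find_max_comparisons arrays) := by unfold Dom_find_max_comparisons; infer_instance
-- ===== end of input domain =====

-- B drops the sorted-array construction and replaces A's recursive quicksort count
-- by an explicit-stack loop with a running accumulator (alternative decomposition).


-- ===== PORT A =====
-- shared primitive: the Python list comprehension [x for x in l if p x]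
def pyFilter (p : Int → Bool) : List Int → List Int
  | [] => []
  | x :: xs => if p x then x :: pyFilter p xs else pyFilter p xs

-- A's recursive helper; the Nat fuel is only a structural totality guard: fuel
-- arr.length + 1 always suffices (qcFuel_irrel/countLoop_eq below prove fuel-irrelevance),
-- the fuel-0 branch is never reached from find_max_comparisons.
-- Pivot index len/2 is always in range here (len ≥ 2), so getD with default 0 is exact.
def quicksort_comparisons : Nat → List Int → List Int × Int
  | 0, arr => (arr, 0)
  | fuel + 1, arr =>
    if arr.length ≤ 1 then (arr, 0)
    else
      let pivot := arr.getD (arr.length / 2) 0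
      let sl := quicksort_comparisons fuel (pyFilter (fun x => x < pivot) arr)
      let sr := quicksort_comparisons fuel (pyFilter (fun x => pivot < x) arr)
      (sl.1 ++ pyFilter (fun x => x = pivot) arr ++ sr.1, sl.2 + sr.2 + (arr.length : Int) - 1)

-- arr.copy is the identity on the value level
def find_max_comparisons (arrays : List (List Int)) : Option (List Int) × Int :=
  arrays.foldl
    (fun st arr =>
      let r := quicksort_comparisons (arr.length + 1) arr
      if r.2 > st.2 then (some arr, r.2) else st)
    (none, -1)

-- ===== PORT B =====
-- B's explicit stack, head = top (Python pops/pushes at the list's end); the Nat fuel is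
-- only a structural totality guard: 2*arr.length+2 always suffices (countLoop_eq below),
-- the fuel-0 branch is never reached from find_max_comparisons_alt.
def countLoop : Nat → List (List Int) → Int → Int
  | 0, _, total => total
  | fuel + 1, stack, total =>
    match stack with
    | [] => total
    | seg :: rest =>
      if seg.length ≤ 1 then countLoop fuel rest total
      else
        let pivot := seg.getD (seg.length / 2) 0
        countLoop fuel
          ((pyFilter (fun x => pivot < x) seg) :: (pyFilter (fun x => x < pivot) seg) :: rest)
          (total + (seg.length : Int) - 1)

def find_max_comparisons_alt (arrays : List (List Int)) : Option (List Int) × Int :=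
  arrays.foldl
    (fun st arr =>
      let total := countLoop (2 * arr.length + 2) [arr] 0
      if total > st.2 then (some arr, total) else st)
    (none, -1)

-- ===== PRECONDITION & SPEC =====
def Spec_find_max_comparisons (arrays : List (List Int)) (out : Option (List Int) × Int) : Prop := out = find_max_comparisons_alt arrays
instance (arrays : List (List Int)) (out : Option (List Int) × Int) : Decidable (Spec_find_max_comparisons arrays out) := by unfold Spec_find_max_comparisons; infer_instance

-- ===== CLAIM (what is proved, stated in full; the proofs are below) =====
def Claim_equal_find_max_comparisons : Prop := ∀ (arrays : List (List Int)), Dom_find_max_comparisons arrays → Spec_find_max_comparisons arrays (find_max_comparisons arrays)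

-- ===== LEMMAS AND PROOFS =====

theorem pyFilter_eq (p : Int → Bool) (l : List Int) : pyFilter p l = l.filter p := by
  induction l with
  | nil => rfl
  | cons x xs ih => simp only [pyFilter, List.filter_cons]; split <;> simp [ih]

theorem pv_getD_mem {l : List Int} {i : Nat} (h : i < l.length) : l.getD i 0 ∈ l := by
  rw [List.getD_eq_getElem l 0 h]; exact List.getElem_mem h

theorem pv_filter_lt {p : Int → Bool} {l : List Int} {a : Int} (ha : a ∈ l) (hpa : p a = false) :
    (pyFilter p l).length < l.length := by
  rw [pyFilter_eq]
  exact List.length_filter_lt_length_iff_exists.2 ⟨a, ha, by simp [hpa]⟩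

theorem pv_split_le (a : Int) (l : List Int) :
    (pyFilter (fun x => x < a) l).length + (pyFilter (fun x => a < x) l).length
      + (if a ∈ l then 1 else 0) ≤ l.length := by
  induction l with
  | nil => simp [pyFilter]
  | cons x xs ih =>
    rcases lt_trichotomy x a with h|h|h
    · have e1 : pyFilter (fun x => x < a) (x :: xs) = x :: pyFilter (fun x => x < a) xs := by
        simp [pyFilter, h]
      have e2 : pyFilter (fun x => a < x) (x :: xs) = pyFilter (fun x => a < x) xs := by
        simp [pyFilter]; omega
      have e3 : (if a ∈ x :: xs then (1:ℕ) else 0) = (if a ∈ xs then 1 else 0) := by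
        by_cases hm : a ∈ xs
        · simp [List.mem_cons, hm]
        · simp [List.mem_cons, hm]; omega
      rw [e1, e2, e3]; simp only [List.length_cons]; omega
    · subst h
      have e1 : pyFilter (fun y => y < x) (x :: xs) = pyFilter (fun y => y < x) xs := by
        simp [pyFilter]
      have e2 : pyFilter (fun y => x < y) (x :: xs) = pyFilter (fun y => x < y) xs := by
        simp [pyFilter]
      have e3 : (if x ∈ x :: xs then (1:ℕ) else 0) = 1 := by simp
      rw [e1, e2, e3]; simp only [List.length_cons]
      have h4 : (if x ∈ xs then (1:ℕ) else 0) ≤ 1 := by split_ifs <;> omega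
      omega
    · have e1 : pyFilter (fun y => y < a) (x :: xs) = pyFilter (fun y => y < a) xs := by
        simp [pyFilter]; omega
      have e2 : pyFilter (fun y => a < y) (x :: xs) = x :: pyFilter (fun y => a < y) xs := by
        simp [pyFilter, h]
      have e3 : (if a ∈ x :: xs then (1:ℕ) else 0) = (if a ∈ xs then 1 else 0) := by
        by_cases hm : a ∈ xs
        · simp [List.mem_cons, hm]
        · simp [List.mem_cons, hm]; omega
      rw [e1, e2, e3]; simp only [List.length_cons]; omega

-- any fuel above the list length computes the same result
theorem qcFuel_irrel (n : Nat) : ∀ (arr : List Int), arr.length ≤ n →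
    ∀ (f1 f2 : Nat), arr.length < f1 → arr.length < f2 →
      quicksort_comparisons f1 arr = quicksort_comparisons f2 arr := by
  induction n with
  | zero =>
    intro arr hle f1 f2 h1 h2
    match f1, f2 with
    | g1 + 1, g2 + 1 =>
      rw [quicksort_comparisons, quicksort_comparisons, if_pos (by omega), if_pos (by omega)]
  | succ n ih =>
    intro arr hle f1 f2 h1 h2
    match f1, f2 with
    | g1 + 1, g2 + 1 =>
      by_cases hs : arr.length ≤ 1
      · rw [quicksort_comparisons, quicksort_comparisons, if_pos hs, if_pos hs]
      · have hpm : arr.getD (arr.length / 2) 0 ∈ arr := pv_getD_mem (i := arr.length / 2) (by omega)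
        have hl := pv_filter_lt (a := arr.getD (arr.length / 2) 0) hpm
          (p := fun x => x < arr.getD (arr.length / 2) 0) (by simp)
        have hr := pv_filter_lt (a := arr.getD (arr.length / 2) 0) hpm
          (p := fun x => arr.getD (arr.length / 2) 0 < x) (by simp)
        rw [quicksort_comparisons, quicksort_comparisons, if_neg hs, if_neg hs]
        simp only
        rw [ih _ (by omega) g1 g2 (by omega) (by omega),
            ih _ (by omega) g1 g2 (by omega) (by omega)]

-- the stack loop accumulates exactly A's recursive comparison counts
theorem countLoop_eq : ∀ (f : Nat) (stack : List (List Int)) (total : Int),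
    (stack.map (fun s => 2 * s.length + 1)).sum < f →
      countLoop f stack total
        = total + (stack.map (fun s => (quicksort_comparisons (s.length + 1) s).2)).sum := by
  intro f
  induction f with
  | zero => intro stack total h; simp at h
  | succ f ih =>
    intro stack total h
    match stack with
    | [] => simp [countLoop]
    | seg :: rest =>
      simp only [List.map_cons, List.sum_cons] at h
      by_cases hs : seg.length ≤ 1
      · rw [countLoop, if_pos hs, ih rest total (by omega)]
        have hz : (quicksort_comparisons (seg.length + 1) seg).2 = 0 := by
          rw [quicksort_comparisons, if_pos hs]
        simp only [List.map_cons, List.sum_cons, hz]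
        ring
      · have hpm : seg.getD (seg.length / 2) 0 ∈ seg := pv_getD_mem (i := seg.length / 2) (by omega)
        have hl := pv_filter_lt (a := seg.getD (seg.length / 2) 0) hpm
          (p := fun x => x < seg.getD (seg.length / 2) 0) (by simp)
        have hr := pv_filter_lt (a := seg.getD (seg.length / 2) 0) hpm
          (p := fun x => seg.getD (seg.length / 2) 0 < x) (by simp)
        have hsplit := pv_split_le (seg.getD (seg.length / 2) 0) seg
        rw [if_pos hpm] at hsplit
        rw [countLoop, if_neg hs]
        rw [ih _ _ (by simp only [List.map_cons, List.sum_cons]; omega)]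
        have hq : (quicksort_comparisons (seg.length + 1) seg).2
            = (quicksort_comparisons seg.length (pyFilter (fun x => x < seg.getD (seg.length / 2) 0) seg)).2
              + (quicksort_comparisons seg.length (pyFilter (fun x => seg.getD (seg.length / 2) 0 < x) seg)).2
              + (seg.length : Int) - 1 := by
          rw [quicksort_comparisons, if_neg hs]
        have el : quicksort_comparisons seg.length (pyFilter (fun x => x < seg.getD (seg.length / 2) 0) seg)
            = quicksort_comparisons ((pyFilter (fun x => x < seg.getD (seg.length / 2) 0) seg).length + 1)
                (pyFilter (fun x => x < seg.getD (seg.length / 2) 0) seg) :=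
          qcFuel_irrel _ _ le_rfl _ _ (by omega) (by omega)
        have er : quicksort_comparisons seg.length (pyFilter (fun x => seg.getD (seg.length / 2) 0 < x) seg)
            = quicksort_comparisons ((pyFilter (fun x => seg.getD (seg.length / 2) 0 < x) seg).length + 1)
                (pyFilter (fun x => seg.getD (seg.length / 2) 0 < x) seg) :=
          qcFuel_irrel _ _ le_rfl _ _ (by omega) (by omega)
        rw [el, er] at hq
        simp only [List.map_cons, List.sum_cons, hq]
        ring

theorem countLoop_single (arr : List Int) :
    countLoop (2 * arr.length + 2) [arr] 0 = (quicksort_comparisons (arr.length + 1) arr).2 := by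
  rw [countLoop_eq _ _ _ (by simp only [List.map_cons, List.map_nil, List.sum_cons, List.sum_nil]; omega)]
  simp

-- ===== VERDICT (by name: the statement is the Claim_ definition above) =====
theorem find_max_comparisons_spec : Claim_equal_find_max_comparisons := by
  intro arrays _
  unfold Spec_find_max_comparisons find_max_comparisons find_max_comparisons_alt
  simp only [countLoop_single]
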